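-- pv_equiv track=rewrite | github.com/Micromeda/pygenprop | pygenprop/database_file_parser.py | unwrap_genome_property_record
-- ===== SOURCE A (Python) =====
-- from itertools import groupby
--
-- def unwrap_genome_property_record(genome_property_record):
--     """
--     The standard genome property record wraps every 80 lines. This function unwraps the record.
--
--     :param genome_property_record: A list of marker, content tuples representing genome property flat file lines.
--     :return:    A list of reduced redundancy markers, content tuples representing genome property flat file lines.
--                 Consecutive markers (often 'CC' and '**') markers are collapsed to one tuple.
--     """
--     collapsed_genome_property_record = []
--     non_collapse_makers = ('EV', 'RQ')
--
--     # Bin rows with consecutive markers using groupby. Collapse consecutive markers in bin.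
--     for bin_marker, binned in groupby(genome_property_record, lambda x: x[0]):
--         bin_contents = (row_content for row_marker, row_content in binned)
--
--         if bin_marker in non_collapse_makers:
--             for content in bin_contents:
--                 collapsed_genome_property_record.append((bin_marker, content))
--         else:
--             collapsed_genome_property_record.append((bin_marker, ' '.join(bin_contents)))
--
--     return collapsed_genome_property_record
-- ===== SOURCE B (Python) =====
-- def unwrap_genome_property_record(genome_property_record):
--     """
--     Build the collapsed record back-to-front: walk the rows in reverse and merge
--     each row directly into the (reversed) output -- an EV/RQ row is always kept
--     as its own tuple; any other row is prepended into the output's front tuple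
--     when that tuple carries the same marker (the front tuple always corresponds
--     to the run starting at the very next row), otherwise it opens a new tuple.
--     No group buffer is ever materialized.
--     """
--     out = []  # reversed final result
--     for marker, content in reversed(genome_property_record):
--         if marker in ('EV', 'RQ'):
--             out.append((marker, content))
--         elif out and out[-1][0] == marker:
--             out[-1] = (marker, content + ' ' + out[-1][1])
--         else:
--             out.append((marker, content))
--     out.reverse()
--     return out
-- ===== Notes on version B (the rewrite author's own statement) =====
-- stated objective: alternative
-- what changed: Instead of grouping consecutive rows into bins and emitting each bin (itertools.groupby), B walks the rows in reverse and merges each non-EV/RQ row directly into the front tuple of the already-built output when the markers match, so no group/bin buffer is ever materialized and the result is built back-to-front.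
import Mathlib
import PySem

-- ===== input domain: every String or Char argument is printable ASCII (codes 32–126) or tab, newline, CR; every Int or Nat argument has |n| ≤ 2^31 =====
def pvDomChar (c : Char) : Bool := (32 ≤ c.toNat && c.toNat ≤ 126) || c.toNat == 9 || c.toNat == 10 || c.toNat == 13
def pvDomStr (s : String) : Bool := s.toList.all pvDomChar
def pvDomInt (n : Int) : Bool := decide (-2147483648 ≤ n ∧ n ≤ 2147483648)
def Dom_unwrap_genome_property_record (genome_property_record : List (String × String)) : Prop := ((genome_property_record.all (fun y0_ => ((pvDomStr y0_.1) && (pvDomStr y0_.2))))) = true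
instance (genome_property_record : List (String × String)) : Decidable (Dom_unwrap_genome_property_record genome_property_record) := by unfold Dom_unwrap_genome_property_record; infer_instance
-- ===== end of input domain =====

-- B builds the collapsed record back-to-front: it walks the rows in reverse and merges each
-- non-EV/RQ row directly into the front tuple of the already-built output (no group buffer);
-- same cost as A's groupby pass, alternative algorithmic decomposition.

-- ===== PORT A =====
-- emit one groupby bin: EV/RQ rows are appended one per content, others collapsed with ' '.join
def pvEmitA (m : String) (cs : List String) : List (String × String) :=
  if m = "EV" ∨ m = "RQ" then cs.map (fun c => (m, c)) else [(m, PySem.Str.join " " cs)]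

-- itertools.groupby over x[0]: a run of equal markers is takeWhile, the rest is dropWhile
def unwrap_genome_property_record (genome_property_record : List (String × String)) : List (String × String) :=
  match genome_property_record with
  | [] => []
  | (m, c) :: rest =>
      pvEmitA m (c :: (rest.takeWhile (fun p => p.1 == m)).map Prod.snd) ++
        unwrap_genome_property_record (rest.dropWhile (fun p => p.1 == m))
  termination_by genome_property_record.length
  decreasing_by
    simp only [List.length_cons]
    exact Nat.lt_succ_of_le (List.length_dropWhile_le _ _)

-- ===== PORT B =====
-- one iteration of Source B's loop: out is the reversed-so-far output, (m, c) the current row;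
-- out[-1] is List.getLast?, 'out[-1] = …' is dropLast ++ [·]
def pvStepB (out : List (String × String)) (p : String × String) : List (String × String) :=
  if p.1 = "EV" ∨ p.1 = "RQ" then out ++ [(p.1, p.2)]
  else
    match out.getLast? with
    | some (m0, s) =>
        if m0 = p.1 then out.dropLast ++ [(p.1, p.2 ++ " " ++ s)] else out ++ [(p.1, p.2)]
    | none => out ++ [(p.1, p.2)]

-- Source B: for marker, content in reversed(record): … ; out.reverse(); return out
def unwrap_genome_property_record_alt (genome_property_record : List (String × String)) : List (String × String) :=
  (genome_property_record.reverse.foldl pvStepB []).reverse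

-- ===== PRECONDITION & SPEC =====
def Spec_unwrap_genome_property_record (genome_property_record : List (String × String)) (out : List (String × String)) : Prop := out = unwrap_genome_property_record_alt genome_property_record
instance (genome_property_record : List (String × String)) (out : List (String × String)) : Decidable (Spec_unwrap_genome_property_record genome_property_record out) := by unfold Spec_unwrap_genome_property_record; infer_instance

-- ===== CLAIM (what is proved, stated in full; the proofs are below) =====
def Claim_equal_unwrap_genome_property_record : Prop := ∀ (genome_property_record : List (String × String)), Dom_unwrap_genome_property_record genome_property_record → Spec_unwrap_genome_property_record genome_property_record (unwrap_genome_property_record genome_property_record)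

-- ===== LEMMAS AND PROOFS =====

-- head-merge view of one B step, stated on the un-reversed output
def pvMergeHead (m c : String) (res : List (String × String)) : List (String × String) :=
  if m = "EV" ∨ m = "RQ" then (m, c) :: res
  else
    match res with
    | (m0, s) :: t => if m0 = m then (m, c ++ " " ++ s) :: t else (m, c) :: (m0, s) :: t
    | [] => [(m, c)]

theorem pvStepB_reverse (out : List (String × String)) (m c : String) :
    (pvStepB out (m, c)).reverse = pvMergeHead m c out.reverse := by
  unfold pvStepB pvMergeHead
  by_cases hEV : m = "EV" ∨ m = "RQ"
  · simp [hEV]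
  · simp only [hEV, if_false]
    cases hout : out.getLast? with
    | none =>
        have : out = [] := List.getLast?_eq_none_iff.mp hout
        subst this; simp
    | some p =>
        obtain ⟨m0, s⟩ := p
        have hrev : out.reverse = (m0, s) :: out.dropLast.reverse := by
          have h1 : out.reverse.head? = some (m0, s) := by
            rw [List.head?_reverse]; exact hout
          have h2 : out.reverse.tail = out.dropLast.reverse := by
            rw [List.tail_reverse]
          cases hr : out.reverse with
          | nil => simp [hr] at h1
          | cons a t =>
              simp [hr] at h1 h2
              simp [h1, h2]
        by_cases hm : m0 = m
        · simp [hm, hrev]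
        · simp [hm, hrev]

-- unrolling B over the head row
theorem alt_cons (m c : String) (rest : List (String × String)) :
    unwrap_genome_property_record_alt ((m, c) :: rest) =
      pvMergeHead m c (unwrap_genome_property_record_alt rest) := by
  unfold unwrap_genome_property_record_alt
  rw [List.reverse_cons, List.foldl_append]
  simp only [List.foldl_cons, List.foldl_nil]
  exact pvStepB_reverse _ m c

theorem join_cons_cons (c d : String) (ds : List String) :
    PySem.Str.join " " (c :: d :: ds) = c ++ " " ++ PySem.Str.join " " (d :: ds) := by
  simp only [PySem.Str.join, List.map_cons]
  rw [PySem.Chars.join_cons_cons]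
  apply String.toList_injective
  simp [String.toList_ofList]

-- A swallows an initial run; merging one more row of the same marker extends that run
theorem mergeHead_A (m c : String) (rest : List (String × String)) :
    pvMergeHead m c (unwrap_genome_property_record rest) = unwrap_genome_property_record ((m, c) :: rest) := by
  cases rest with
  | nil =>
      rw [unwrap_genome_property_record.eq_def]
      unfold pvMergeHead
      unfold unwrap_genome_property_record pvEmitA
      by_cases hEV : m = "EV" ∨ m = "RQ" <;>
        simp [hEV, PySem.Str.join, PySem.Chars.join_singleton, unwrap_genome_property_record.eq_def]
  | cons hd tl =>
      obtain ⟨m2, c2⟩ := hd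
      by_cases hm : m2 = m
      · subst hm
        conv_rhs => rw [unwrap_genome_property_record.eq_def]
        conv_lhs => rw [unwrap_genome_property_record.eq_def]
        simp only [List.takeWhile_cons, List.dropWhile_cons, beq_self_eq_true, if_pos trivial,
          List.map_cons]
        unfold pvMergeHead pvEmitA
        by_cases hEV : m2 = "EV" ∨ m2 = "RQ"
        · simp [hEV]
        · simp only [hEV, if_false]
          rw [join_cons_cons]
          simp
      · have hb : ((m2, c2).1 == m) = false := by simpa using hm
        conv_rhs => rw [unwrap_genome_property_record.eq_def]
        simp only [List.takeWhile_cons, List.dropWhile_cons, hb, Bool.false_eq_true,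
          if_false, List.map_nil]
        rw [unwrap_genome_property_record.eq_def]
        unfold pvMergeHead pvEmitA
        by_cases hEV : m = "EV" ∨ m = "RQ"
        · by_cases hEV2 : m2 = "EV" ∨ m2 = "RQ"
          · simp [hEV, hEV2]
          · simp [hEV, hEV2]
        · by_cases hEV2 : m2 = "EV" ∨ m2 = "RQ"
          · -- first element of A rest has marker m2 ≠ m
            rcases hx : (c2 :: (tl.takeWhile (fun p => p.1 == m2)).map Prod.snd) with _ | ⟨x, xs⟩
            · simp at hx
            · simp [hEV, hEV2, hm, PySem.Str.join, PySem.Chars.join_singleton]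
          · simp [hEV, hEV2, hm, PySem.Str.join, PySem.Chars.join_singleton]

theorem alt_eq (l : List (String × String)) :
    unwrap_genome_property_record_alt l = unwrap_genome_property_record l := by
  induction l with
  | nil => simp [unwrap_genome_property_record_alt, unwrap_genome_property_record]
  | cons hd tl ih =>
      obtain ⟨m, c⟩ := hd
      rw [alt_cons, ih, mergeHead_A]

-- ===== VERDICT (by name: the statement is the Claim_ definition above) =====
theorem unwrap_genome_property_record_spec : Claim_equal_unwrap_genome_property_record := by
  intro l _
  unfold Spec_unwrap_genome_property_record
  exact (alt_eq l).symm
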